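-- pv_equiv track=rewrite | github.com/heineborell/grand_tours | src/data/segment_analyse.py | optimize_for_longest_segments
-- ===== SOURCE A (Python) =====
-- def check_overlap(segment1: list[int], segment2: list[int]) -> bool:
--     """
--     Check if two segments overlap
--
--     Args:
--         segment1: First segment [start, end]
--         segment2: Second segment [start, end]
--
--     Returns:
--         bool: True if segments overlap, False otherwise
--     """
--     return max(segment1[0], segment2[0]) < min(segment1[1], segment2[1])
--
-- def optimize_for_longest_segments(segments: list[list[int]]) -> list[list[int]]:
--     """
--     Find non-overlapping segments prioritizing longer individual segments.
--
--     Args: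
--         segments: List of segments [start, end]
--
--     Returns:
--         list: Optimized non-overlapping segments ordered by start position
--     """
--     if not segments:
--         return []
--
--     # Sort by length (descending), then by start position for tie-breaking
--     sorted_segments = sorted(segments, key=lambda x: (-(x[1] - x[0]), x[0]))
--
--     selected = []
--     for segment in sorted_segments:
--         # Check if current segment overlaps with any already selected segment
--         if not any(check_overlap(segment, selected_seg) for selected_seg in selected):
--             selected.append(segment)
--
--     # Return segments sorted by start position
--     return sorted(selected, key=lambda x: x[0])
-- ===== SOURCE B (Python) =====
-- def optimize_for_longest_segments(segments: list[list[int]]) -> list[list[int]]: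
--     """Select-and-prune greedy: repeatedly take the best remaining segment
--     (longest, then earliest start) and discard everything it overlaps."""
--     if not segments:
--         return []
--     pending = sorted(segments, key=lambda x: (-(x[1] - x[0]), x[0]))
--     selected = []
--     while pending:
--         seg = pending[0]
--         selected.append(seg)
--         pending = [t for t in pending[1:]
--                    if not (max(t[0], seg[0]) < min(t[1], seg[1]))]
--     return sorted(selected, key=lambda x: x[0])
-- ===== Notes on version B (the rewrite author's own statement) =====
-- stated objective: alternative
-- what changed: A accumulates a 'selected' list and re-scans all of it (any + check_overlap) for every candidate; B never keeps a growing checked-against set: it repeatedly pops the best remaining segment and prunes the pending list of everything overlapping it, so each candidate is compared only against the segments that eliminate it.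
import Mathlib
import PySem

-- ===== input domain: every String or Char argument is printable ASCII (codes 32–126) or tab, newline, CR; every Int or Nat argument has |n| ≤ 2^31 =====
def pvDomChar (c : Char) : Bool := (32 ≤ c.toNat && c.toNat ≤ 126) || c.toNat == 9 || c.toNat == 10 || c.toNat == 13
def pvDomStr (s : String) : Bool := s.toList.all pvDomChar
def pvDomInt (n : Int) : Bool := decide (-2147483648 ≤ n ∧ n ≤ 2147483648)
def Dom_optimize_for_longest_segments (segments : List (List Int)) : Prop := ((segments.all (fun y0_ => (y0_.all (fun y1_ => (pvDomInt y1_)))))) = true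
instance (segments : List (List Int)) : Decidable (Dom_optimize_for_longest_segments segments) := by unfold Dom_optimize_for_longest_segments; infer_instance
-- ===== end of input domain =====

-- B is an alternative of the same cost: a select-and-prune greedy (pop the best remaining
-- segment, drop everything overlapping it) instead of A's check-each-candidate-against-all-
-- selected accumulation; equivalence of the return values is proved on Pre_ below.

-- ===== PORT A =====
-- check_overlap(segment1, segment2); indices 0/1 read with default 0 (Pre_ guarantees length ≥ 2)
def check_overlap (segment1 segment2 : List Int) : Bool :=
  max (PySem.List.pyGetD segment1 0 0) (PySem.List.pyGetD segment2 0 0)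
    < min (PySem.List.pyGetD segment1 1 0) (PySem.List.pyGetD segment2 1 0)

-- the sort key (-(x[1]-x[0]), x[0]) as a lexicographic pair (Python tuple comparison)
def segKey (x : List Int) : Lex (Int × Int) :=
  toLex (-(PySem.List.pyGetD x 1 0 - PySem.List.pyGetD x 0 0), PySem.List.pyGetD x 0 0)

def optimize_for_longest_segments (segments : List (List Int)) : List (List Int) :=
  if segments = [] then []
  else
    let sorted_segments := PySem.List.sorted segments segKey false
    let selected := sorted_segments.foldl
      (fun selected segment =>
        if selected.any (fun selected_seg => check_overlap segment selected_seg)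
        then selected else selected ++ [segment]) []
    PySem.List.sorted selected (fun x => PySem.List.pyGetD x 0 0) false

-- ===== PORT B =====
-- the while-loop of Source B: pop the head, prune the rest, recurse
def pruneSelect : List (List Int) → List (List Int)
  | [] => []
  | seg :: rest =>
      seg :: pruneSelect (rest.filter (fun t => !check_overlap t seg))
termination_by xs => xs.length
decreasing_by
  simp only [List.length_unattach]
  exact Nat.lt_succ_of_le (le_trans (List.length_filter_le _ _) (le_of_eq List.length_attach))

def optimize_for_longest_segments_alt (segments : List (List Int)) : List (List Int) :=
  if segments = [] then []
  else
    PySem.List.sorted (pruneSelect (PySem.List.sorted segments segKey false))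
      (fun x => PySem.List.pyGetD x 0 0) false

-- ===== PRECONDITION & SPEC =====
-- Pre_ excludes exactly the inputs where Python A raises IndexError: a segment with
-- fewer than 2 entries makes the sort-key lambda x[1]-x[0] (or x[0]) raise.
def Pre_optimize_for_longest_segments (segments : List (List Int)) : Prop :=
  ∀ s ∈ segments, 2 ≤ s.length
instance (segments : List (List Int)) : Decidable (Pre_optimize_for_longest_segments segments) := by
  unfold Pre_optimize_for_longest_segments; infer_instance

def pvWitness_optimize_for_longest_segments : List (List Int) := [[0, 5], [2, 3], [6, 8]]

def Spec_optimize_for_longest_segments (segments : List (List Int)) (out : List (List Int)) : Prop :=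
  out = optimize_for_longest_segments_alt segments
instance (segments : List (List Int)) (out : List (List Int)) : Decidable (Spec_optimize_for_longest_segments segments out) := by
  unfold Spec_optimize_for_longest_segments; infer_instance

-- ===== CLAIM (what is proved, stated in full; the proofs are below) =====
def Claim_equal_optimize_for_longest_segments : Prop :=
  ∀ (segments : List (List Int)), Dom_optimize_for_longest_segments segments →
    Pre_optimize_for_longest_segments segments →
    Spec_optimize_for_longest_segments segments (optimize_for_longest_segments segments)

-- ===== LEMMAS AND PROOFS =====

-- A's accumulating fold = acc ++ select-and-prune on the candidates not blocked by acc.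
theorem foldA_eq_pruneSelect (xs : List (List Int)) :
    ∀ acc : List (List Int),
      xs.foldl (fun selected segment =>
          if selected.any (fun a => check_overlap segment a)
          then selected else selected ++ [segment]) acc
        = acc ++ pruneSelect (xs.filter (fun t => !acc.any (fun a => check_overlap t a))) := by
  induction xs with
  | nil => intro acc; simp [pruneSelect]
  | cons s r ih =>
      intro acc
      by_cases h : acc.any (fun a => check_overlap s a)
      · simp only [List.foldl_cons, h, if_true, List.filter_cons, Bool.not_eq_eq_eq_not,
          Bool.not_true]
        rw [ih acc]
        simp [h]
      · simp only [List.foldl_cons, h, if_false, List.filter_cons, Bool.not_false]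
        simp only [Bool.false_eq_true, if_false, if_true]
        rw [ih (acc ++ [s])]
        have hfilter :
            r.filter (fun t => !(acc ++ [s]).any (fun a => check_overlap t a))
              = (r.filter (fun t => !acc.any (fun a => check_overlap t a))).filter
                  (fun t => !check_overlap t s) := by
          rw [List.filter_filter]
          apply List.filter_congr
          intro t _
          simp [List.any_append, Bool.not_or, Bool.and_comm]
        rw [hfilter]
        simp [pruneSelect]

theorem optimize_eq (segments : List (List Int)) :
    optimize_for_longest_segments segments = optimize_for_longest_segments_alt segments := by
  unfold optimize_for_longest_segments optimize_for_longest_segments_alt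
  by_cases h : segments = []
  · simp [h]
  · simp only [h, if_false]
    rw [foldA_eq_pruneSelect _ []]
    simp

-- ===== VERDICT (by name: the statement is the Claim_ definition above) =====
theorem optimize_for_longest_segments_spec : Claim_equal_optimize_for_longest_segments := by
  intro segments _ _
  exact optimize_eq segments
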